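-- pv_equiv track=rewrite | github.com/AU-DIS/ReliK | approach/datahandler.py | findingRankNegHead
-- ===== SOURCE A (Python) =====
-- def findingRankNegHead(orderedList, key, all_triples_set, fix):
--     counter = 1
--     for ele in orderedList:
--         if key[0] == ele[0] and key[1] == ele[1]:
--             return counter
--         tup = (fix,ele[0],ele[1])
--         if tup in all_triples_set:
--             continue
--         counter += 1
--     return None
-- ===== SOURCE B (Python) =====
-- def findingRankNegHead(orderedList, key, all_triples_set, fix):
--     idx = next((i for i, ele in enumerate(orderedList)
--                 if key[0] == ele[0] and key[1] == ele[1]), None)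
--     if idx is None:
--         return None
--     seen = set(all_triples_set)
--     return 1 + sum(1 for ele in orderedList[:idx]
--                    if (fix, ele[0], ele[1]) not in seen)
-- ===== Notes on version B (the rewrite author's own statement) =====
-- stated objective: alternative
-- what changed: Replaces the single guarded counter loop by a two-phase locate-then-count: find the index of the first matching element, then count qualifying predecessors in the prefix slice using a prebuilt set.
import Mathlib
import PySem

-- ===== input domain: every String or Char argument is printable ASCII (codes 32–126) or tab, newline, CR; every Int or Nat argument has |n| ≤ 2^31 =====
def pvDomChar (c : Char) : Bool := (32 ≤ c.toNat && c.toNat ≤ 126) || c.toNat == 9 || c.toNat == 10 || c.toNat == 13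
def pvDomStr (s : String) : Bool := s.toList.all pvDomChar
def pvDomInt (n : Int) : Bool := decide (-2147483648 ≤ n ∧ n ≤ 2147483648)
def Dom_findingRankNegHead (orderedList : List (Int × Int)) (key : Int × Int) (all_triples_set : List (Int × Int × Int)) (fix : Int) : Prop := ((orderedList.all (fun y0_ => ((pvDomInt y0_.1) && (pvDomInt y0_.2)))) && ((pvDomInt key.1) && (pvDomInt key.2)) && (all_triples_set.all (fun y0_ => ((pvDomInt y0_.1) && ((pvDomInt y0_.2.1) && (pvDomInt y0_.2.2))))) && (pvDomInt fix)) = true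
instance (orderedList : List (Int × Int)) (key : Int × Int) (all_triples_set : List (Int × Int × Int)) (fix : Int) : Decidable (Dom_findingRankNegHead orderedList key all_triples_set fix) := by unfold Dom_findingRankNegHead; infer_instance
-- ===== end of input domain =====

-- ===== PORT A =====
-- counter loop of A, step for step: return counter on match, skip known triples, else increment
def pvALoop (key : Int × Int) (all_triples_set : List (Int × Int × Int)) (fix : Int) :
    List (Int × Int) → Int → Option Int
  | [], _ => none
  | ele :: rest, counter =>
    if key.1 == ele.1 && key.2 == ele.2 then some counter
    else if (fix, ele.1, ele.2) ∈ all_triples_set then pvALoop key all_triples_set fix rest counter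
    else pvALoop key all_triples_set fix rest (counter + 1)

def findingRankNegHead (orderedList : List (Int × Int)) (key : Int × Int) (all_triples_set : List (Int × Int × Int)) (fix : Int) : Option Int :=
  pvALoop key all_triples_set fix orderedList 1

-- ===== PORT B =====
-- B: locate the first match, then count qualifying predecessors in the prefix slice
def findingRankNegHead_alt (orderedList : List (Int × Int)) (key : Int × Int) (all_triples_set : List (Int × Int × Int)) (fix : Int) : Option Int :=
  match orderedList.findIdx? (fun ele => key.1 == ele.1 && key.2 == ele.2) with
  | none => none
  | some i =>
    some (1 + ((orderedList.take i).countP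
        (fun ele => !((fix, ele.1, ele.2) ∈ all_triples_set : Bool)) : Int))

-- ===== PRECONDITION & SPEC =====
def Spec_findingRankNegHead (orderedList : List (Int × Int)) (key : Int × Int) (all_triples_set : List (Int × Int × Int)) (fix : Int) (out : Option Int) : Prop := out = findingRankNegHead_alt orderedList key all_triples_set fix
instance (orderedList : List (Int × Int)) (key : Int × Int) (all_triples_set : List (Int × Int × Int)) (fix : Int) (out : Option Int) : Decidable (Spec_findingRankNegHead orderedList key all_triples_set fix out) := by unfold Spec_findingRankNegHead; infer_instance

-- ===== CLAIM (what is proved, stated in full; the proofs are below) =====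
def Claim_equal_findingRankNegHead : Prop := ∀ (orderedList : List (Int × Int)) (key : Int × Int) (all_triples_set : List (Int × Int × Int)) (fix : Int), Dom_findingRankNegHead orderedList key all_triples_set fix → Spec_findingRankNegHead orderedList key all_triples_set fix (findingRankNegHead orderedList key all_triples_set fix)

-- ===== LEMMAS AND PROOFS =====

theorem pvALoop_eq (key : Int × Int) (ats : List (Int × Int × Int)) (fix : Int) :
    ∀ (ol : List (Int × Int)) (c : Int),
    pvALoop key ats fix ol c =
      (ol.findIdx? (fun ele => key.1 == ele.1 && key.2 == ele.2)).map
        (fun i => c + ((ol.take i).countP (fun ele => !((fix, ele.1, ele.2) ∈ ats : Bool)) : Int))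
  | [], c => rfl
  | ele :: rest, c => by
    by_cases hp : (key.1 == ele.1 && key.2 == ele.2) = true
    · simp [pvALoop, hp, List.findIdx?_cons]
    · by_cases hm : (fix, ele.1, ele.2) ∈ ats
      · simp only [pvALoop, hp, if_false, Bool.false_eq_true, if_pos hm,
          pvALoop_eq key ats fix rest c, List.findIdx?_cons, Option.map_map]
        cases rest.findIdx? (fun ele => key.1 == ele.1 && key.2 == ele.2) with
        | none => rfl
        | some i => simp [Function.comp, hm]
      · simp only [pvALoop, hp, if_neg hm, if_false, Bool.false_eq_true,
          pvALoop_eq key ats fix rest (c + 1), List.findIdx?_cons, Option.map_map]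
        cases rest.findIdx? (fun ele => key.1 == ele.1 && key.2 == ele.2) with
        | none => rfl
        | some i =>
          simp [Function.comp, hm]
          ring

-- ===== VERDICT (by name: the statement is the Claim_ definition above) =====
theorem findingRankNegHead_spec : Claim_equal_findingRankNegHead := by
  intro ol key ats fix _
  unfold Spec_findingRankNegHead findingRankNegHead findingRankNegHead_alt
  rw [pvALoop_eq]
  cases ol.findIdx? (fun ele => key.1 == ele.1 && key.2 == ele.2) with
  | none => rfl
  | some i => simp
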